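-- pv_equiv track=rewrite | github.com/reconlyeu/reconly | packages/core/reconly_core/resilience/errors.py | _is_configuration_error
-- ===== SOURCE A (Python) =====
-- def _is_configuration_error(message: str) -> bool:
--     """Check if error message indicates a configuration problem.
--
--     Args:
--         message: Error message to check
--
--     Returns:
--         True if the error appears to be configuration-related
--     """
--     config_indicators = [
--         "missing", "not set", "not found", "required",
--         "invalid", "configuration", "config",
--     ]
--     key_indicators = [
--         "api key", "api_key", "apikey", "token", "credential",
--     ]
--
--     msg_lower = message.lower()
--
--     # Check for explicit configuration errors
--     for config in config_indicators:
--         for key in key_indicators: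
--             if config in msg_lower and key in msg_lower:
--                 return True
--
--     return False
-- ===== SOURCE B (Python) =====
-- def _is_configuration_error(message: str) -> bool:
--     config_indicators = (
--         "missing", "not set", "not found", "required",
--         "invalid", "configuration", "config",
--     )
--     key_indicators = (
--         "api key", "api_key", "apikey", "token", "credential",
--     )
--     s = message.lower()
--     have_config = False
--     have_key = False
--     for i in range(len(s)):
--         if not have_config and any(s.startswith(c, i) for c in config_indicators):
--             have_config = True
--         if not have_key and any(s.startswith(k, i) for k in key_indicators):
--             have_key = True
--         if have_config and have_key:
--             return True
--     return have_config and have_key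
-- ===== Notes on version B (the rewrite author's own statement) =====
-- stated objective: alternative
-- what changed: A's nested loop over all (config, key) indicator pairs, each doing a full substring search, is replaced by one left-to-right scan of the lowered message that tests each position for an indicator prefix, maintains two found-flags and exits early once both categories have occurred.
import Mathlib
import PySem

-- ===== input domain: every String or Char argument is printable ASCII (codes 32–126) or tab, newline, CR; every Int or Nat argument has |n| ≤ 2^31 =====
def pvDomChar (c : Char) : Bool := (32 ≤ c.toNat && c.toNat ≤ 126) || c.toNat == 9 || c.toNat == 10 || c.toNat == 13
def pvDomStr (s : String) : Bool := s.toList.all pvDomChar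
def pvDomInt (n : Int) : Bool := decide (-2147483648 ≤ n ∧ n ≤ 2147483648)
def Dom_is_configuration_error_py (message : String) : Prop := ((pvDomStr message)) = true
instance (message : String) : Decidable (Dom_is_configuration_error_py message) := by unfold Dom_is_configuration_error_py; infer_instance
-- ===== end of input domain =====

-- B replaces A's nested membership loop over all (config, key) pairs by a single
-- left-to-right scan of the lowered message that maintains two found-flags via
-- position-wise prefix tests with early exit (objective: alternative).

-- ===== PORT A =====
def is_configuration_error_py (message : String) : Bool :=
  let config_indicators : List String :=
    ["missing", "not set", "not found", "required", "invalid", "configuration", "config"]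
  let key_indicators : List String :=
    ["api key", "api_key", "apikey", "token", "credential"]
  let msg_lower := PySem.Str.lower message
  -- nested for-loops with early return on the first pair whose conjunction holds
  config_indicators.any (fun config =>
    key_indicators.any (fun key =>
      PySem.Str.isIn config msg_lower && PySem.Str.isIn key msg_lower))

-- ===== PORT B =====
-- the two indicator lists of Source B, as character lists (B works position-wise)
def pvCfgInds : List (List Char) :=
  ["missing".toList, "not set".toList, "not found".toList, "required".toList,
   "invalid".toList, "configuration".toList, "config".toList]
def pvKeyInds : List (List Char) :=
  ["api key".toList, "api_key".toList, "apikey".toList, "token".toList, "credential".toList]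

-- Source B's for-loop over positions i of s: the suffix s[i:] shrinks by one each step;
-- have_config / have_key are the two flag accumulators, early return when both hold.
def pvScan (s : List Char) (have_config have_key : Bool) : Bool :=
  match s with
  | [] => have_config && have_key
  | x :: rest =>
    let hc := have_config || pvCfgInds.any (fun c => PySem.Chars.startswith (x :: rest) c)
    let hk := have_key || pvKeyInds.any (fun k => PySem.Chars.startswith (x :: rest) k)
    if hc && hk then true else pvScan rest hc hk

def is_configuration_error_py_alt (message : String) : Bool :=
  pvScan (PySem.Str.lower message).toList false false

-- ===== PRECONDITION & SPEC =====
def Spec_is_configuration_error_py (message : String) (out : Bool) : Prop := out = is_configuration_error_py_alt message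
instance (message : String) (out : Bool) : Decidable (Spec_is_configuration_error_py message out) := by unfold Spec_is_configuration_error_py; infer_instance

-- ===== CLAIM (what is proved, stated in full; the proofs are below) =====
def Claim_equal_is_configuration_error_py : Prop := ∀ (message : String), Dom_is_configuration_error_py message → Spec_is_configuration_error_py message (is_configuration_error_py message)

-- ===== LEMMAS AND PROOFS =====

-- 'sub in s' tested on a cons: a prefix match here, or a match further right.
theorem isIn_cons (c : List Char) (x : Char) (rest : List Char) :
    PySem.Chars.isIn c (x :: rest)
      = (PySem.Chars.startswith (x :: rest) c || PySem.Chars.isIn c rest) := by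
  rw [Bool.eq_iff_iff]
  simp only [Bool.or_eq_true, PySem.Chars.isIn_iff_infix, PySem.Chars.startswith_iff]
  exact List.infix_cons_iff

-- the scan computes the two existence facts: flag-or-occurs for each list, conjoined
theorem any_or_split {a : Type} (l : List a) (p q : a → Bool) :
    l.any (fun x => p x || q x) = (l.any p || l.any q) := by
  rw [Bool.eq_iff_iff]
  simp only [List.any_eq_true, Bool.or_eq_true]
  constructor
  · rintro ⟨c, hm, h | h⟩
    · exact Or.inl ⟨c, hm, h⟩
    · exact Or.inr ⟨c, hm, h⟩
  · rintro (⟨c, hm, h⟩ | ⟨c, hm, h⟩)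
    · exact ⟨c, hm, Or.inl h⟩
    · exact ⟨c, hm, Or.inr h⟩

theorem pvScan_eq (s : List Char) (hc hk : Bool) :
    pvScan s hc hk
      = ((hc || pvCfgInds.any (fun c => PySem.Chars.isIn c s)) &&
         (hk || pvKeyInds.any (fun k => PySem.Chars.isIn k s))) := by
  induction s generalizing hc hk with
  | nil =>
    have h1 : pvCfgInds.any (fun c => PySem.Chars.isIn c []) = false := by decide
    have h2 : pvKeyInds.any (fun k => PySem.Chars.isIn k []) = false := by decide
    simp [pvScan, h1, h2]
  | cons x rest ih =>
    have key : ∀ (l : List (List Char)),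
        ((l.any fun c => PySem.Chars.startswith (x :: rest) c) ||
          (l.any fun c => PySem.Chars.isIn c rest))
          = l.any (fun c => PySem.Chars.isIn c (x :: rest)) := by
      intro l
      rw [← any_or_split]
      simp only [isIn_cons]
    simp only [pvScan, ih]
    split_ifs with h
    · simp only [Bool.and_eq_true, Bool.or_eq_true] at h
      symm
      simp only [Bool.and_eq_true, Bool.or_eq_true]
      rcases h with ⟨h1, h2⟩
      constructor
      · rcases h1 with hb | hs
        · exact Or.inl hb
        · exact Or.inr (by rw [← key pvCfgInds]; simp [hs])
      · rcases h2 with hb | hs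
        · exact Or.inl hb
        · exact Or.inr (by rw [← key pvKeyInds]; simp [hs])
    · rw [Bool.or_assoc, Bool.or_assoc, key pvCfgInds, key pvKeyInds]

-- a nested any over a pairwise conjunction factors into two independent anys
theorem any_any_and_factor {α β : Type} (l1 : List α) (l2 : List β)
    (p : α → Bool) (q : β → Bool) :
    (l1.any fun c => l2.any fun k => p c && q k) = (l1.any p && l2.any q) := by
  rw [Bool.eq_iff_iff]
  simp only [List.any_eq_true, Bool.and_eq_true]
  constructor
  · rintro ⟨c, hc, k, hk, hpc, hqk⟩
    exact ⟨⟨c, hc, hpc⟩, ⟨k, hk, hqk⟩⟩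
  · rintro ⟨⟨c, hc, hpc⟩, ⟨k, hk, hqk⟩⟩
    exact ⟨c, hc, k, hk, hpc, hqk⟩

-- ===== VERDICT (by name: the statement is the Claim_ definition above) =====
theorem is_configuration_error_py_spec : Claim_equal_is_configuration_error_py := by
  intro message _
  unfold Spec_is_configuration_error_py is_configuration_error_py is_configuration_error_py_alt
  rw [pvScan_eq, any_any_and_factor]
  simp [pvCfgInds, pvKeyInds, PySem.Str.isIn_eq]
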